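-- pv_equiv track=rewrite | github.com/frederikho/dynamic-coalition-formation | lib/effectivity.py | unanimous_consent
-- ===== SOURCE A (Python) =====
-- def unanimous_consent(players: list, states: list) -> dict:
--     """
--     Alternative effectivity rule: All players must unanimously approve all transitions.
--
--     This is a more restrictive rule that gives every player veto power over any
--     proposed change. It prevents unilateral exit and requires full consensus for
--     any coalition formation or dissolution.
--
--     Rationale: This rule might be more appropriate for contexts where:
--     - International treaties require universal consent
--     - Property rights are strong (no forced membership)
--     - Exit from coalitions requires permission from all parties
--     - Coalition formation needs buy-in from all countries, not just affected ones
--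
--     Note: This makes coalition changes much harder and likely results in more
--     stable but potentially less efficient outcomes.
--
--     Args:
--         players: List of player names
--         states: List of state names
--
--     Returns:
--         Effectivity dictionary with keys (proposer, current_state, next_state, responder)
--         Values are 1 (in committee) or 0 (not in committee)
--     """
--     effectivity = {}
--
--     for proposer in players:
--         for current_state in states:
--             for next_state in states:
--                 for responder in players:
--                     key = (proposer, current_state, next_state, responder)
--
--                     # Status quo: only proposer approves
--                     if current_state == next_state:
--                         effectivity[key] = 1 if responder == proposer else 0
--                     else:
--                         # All transitions require unanimous approval from all players
--                         effectivity[key] = 1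
--
--     return effectivity
-- ===== SOURCE B (Python) =====
-- def unanimous_consent(players: list, states: list) -> dict:
--     """Flat enumeration: rank every (proposer, current, next, responder) quadruple
--     as a single integer and decode it with divmod, instead of nested loops."""
--     P, S = len(players), len(states)
--     effectivity = {}
--     for t in range(P * S * S * P):
--         q, r = divmod(t, P)
--         q, n = divmod(q, S)
--         p, c = divmod(q, S)
--         pr, cs, ns, rs = players[p], states[c], states[n], players[r]
--         effectivity[(pr, cs, ns, rs)] = 1 if (cs != ns or rs == pr) else 0
--     return effectivity
-- ===== Notes on version B (the rewrite author's own statement) =====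
-- stated objective: alternative
-- what changed: Replaces A's four nested loops with an inline branch by a single flat loop over range(P*S*S*P) that decodes each rank into the four indices with divmod and computes the value from the inverted condition (1 unless a status-quo proposal meets a non-proposer responder).
import Mathlib
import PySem

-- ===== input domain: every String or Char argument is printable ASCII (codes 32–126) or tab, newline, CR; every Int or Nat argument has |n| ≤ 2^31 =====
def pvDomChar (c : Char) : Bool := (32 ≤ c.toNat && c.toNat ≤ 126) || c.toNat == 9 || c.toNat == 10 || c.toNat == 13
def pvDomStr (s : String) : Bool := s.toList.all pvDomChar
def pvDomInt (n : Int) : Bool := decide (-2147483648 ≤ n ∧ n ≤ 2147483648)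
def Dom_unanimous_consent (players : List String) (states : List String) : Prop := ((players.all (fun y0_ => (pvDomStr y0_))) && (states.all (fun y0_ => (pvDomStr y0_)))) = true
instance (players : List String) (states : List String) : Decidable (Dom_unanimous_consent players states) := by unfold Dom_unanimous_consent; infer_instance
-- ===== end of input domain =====

-- B replaces A's four nested loops by one flat loop that divmod-decodes a single rank
-- into the four indices (objective: alternative enumeration; same asymptotic cost).


-- ===== PORT A =====
def unanimous_consent (players : List String) (states : List String) : List (String × String × String × String × Int) :=
  (players.foldl (fun effectivity proposer =>
    states.foldl (fun effectivity current_state =>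
      states.foldl (fun effectivity next_state =>
        players.foldl (fun effectivity responder =>
          let key := (proposer, current_state, next_state, responder)
          if current_state = next_state then
            effectivity.insert key (if responder = proposer then (1 : Int) else 0)
          else
            effectivity.insert key 1)
          effectivity)
        effectivity)
      effectivity)
    (PySem.Dict.empty : PySem.Dict (String × String × String × String) Int)).items.map
    (fun kv => (kv.1.1, kv.1.2.1, kv.1.2.2.1, kv.1.2.2.2, kv.2))

-- ===== PORT B =====
-- flat loop: rank t runs over range(P*S*S*P) and is decoded by divmod; the divisors are
-- positive whenever the loop body runs, so Python's divmod(t, P) is exactly (floordiv, mod)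
def unanimous_consent_alt (players : List String) (states : List String) : List (String × String × String × String × Int) :=
  let P : Int := players.length
  let S : Int := states.length
  ((PySem.List.pyRange 0 (P * S * S * P) 1).foldl (fun effectivity t =>
      let q1 := PySem.Int.floordiv t P
      let r := PySem.Int.mod t P
      let q2 := PySem.Int.floordiv q1 S
      let n := PySem.Int.mod q1 S
      let p := PySem.Int.floordiv q2 S
      let c := PySem.Int.mod q2 S
      let pr := PySem.List.pyGetD players p ""
      let cs := PySem.List.pyGetD states c ""
      let ns := PySem.List.pyGetD states n ""
      let rs := PySem.List.pyGetD players r ""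
      effectivity.insert (pr, cs, ns, rs) (if cs ≠ ns ∨ rs = pr then (1 : Int) else 0))
    (PySem.Dict.empty : PySem.Dict (String × String × String × String) Int)).items.map
    (fun kv => (kv.1.1, kv.1.2.1, kv.1.2.2.1, kv.1.2.2.2, kv.2))

-- ===== PRECONDITION & SPEC =====
def Spec_unanimous_consent (players : List String) (states : List String) (out : List (String × String × String × String × Int)) : Prop := out = unanimous_consent_alt players states
instance (players : List String) (states : List String) (out : List (String × String × String × String × Int)) : Decidable (Spec_unanimous_consent players states out) := by unfold Spec_unanimous_consent; infer_instance

-- ===== CLAIM (what is proved, stated in full; the proofs are below) =====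
def Claim_equal_unanimous_consent : Prop := ∀ (players : List String) (states : List String), Dom_unanimous_consent players states → Spec_unanimous_consent players states (unanimous_consent players states)

-- ===== LEMMAS AND PROOFS =====

-- the full list of quadruple keys, in A's enumeration order
def pvL (players states : List String) : List (String × String × String × String) :=
  players.flatMap (fun p => states.flatMap (fun cs => states.flatMap (fun ns =>
    players.map (fun r => (p, cs, ns, r)))))

-- the value both programs store at a key
def pvF (k : String × String × String × String) : Int :=
  if k.2.1 = k.2.2.1 then (if k.2.2.2 = k.1 then 1 else 0) else 1

-- unranking a product index: a map over range (m*n) decoded by div/mod is the nested enumeration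
theorem pv_range_mul_map {α : Type} (m n : Nat) (f : Nat → Nat → α) :
    (List.range (m * n)).map (fun t => f (t / n) (t % n)) =
    (List.range m).flatMap (fun i => (List.range n).map (f i)) := by
  rcases Nat.eq_zero_or_pos n with h | h
  · subst h; simp
  · induction m with
    | zero => simp
    | succ m ih =>
      rw [Nat.succ_mul, List.range_add, List.map_append, ih, List.range_succ,
        List.flatMap_append, List.map_map]
      congr 1
      simp only [List.flatMap_cons, List.flatMap_nil, List.append_nil]
      apply List.map_congr_left
      intro j hj
      have hj' := List.mem_range.mp hj
      have e1 : (m * n + j) / n = m := by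
        rw [Nat.mul_comm m n, Nat.mul_add_div h]; simp [Nat.div_eq_of_lt hj']
      have e2 : (m * n + j) % n = j := by
        rw [Nat.mul_comm m n, Nat.mul_add_mod]; exact Nat.mod_eq_of_lt hj'
      simp [Function.comp, e1, e2]

theorem pv_flatten_flatten {α : Type} (L : List (List (List α))) :
    L.flatten.flatten = (L.map List.flatten).flatten := by
  induction L with
  | nil => simp
  | cons x xs ih => simp [ih]

-- flatMap version of the same unranking
theorem pv_range_mul_flatMap {α : Type} (m n : Nat) (f : Nat → Nat → List α) :
    (List.range (m * n)).flatMap (fun t => f (t / n) (t % n)) =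
    (List.range m).flatMap (fun i => (List.range n).flatMap (f i)) := by
  have h := pv_range_mul_map m n f
  calc (List.range (m * n)).flatMap (fun t => f (t / n) (t % n))
      = ((List.range (m * n)).map (fun t => f (t / n) (t % n))).flatten := by
        rw [List.flatMap_def]
    _ = ((List.range m).flatMap (fun i => (List.range n).map (f i))).flatten := by rw [h]
    _ = (List.range m).flatMap (fun i => (List.range n).flatMap (f i)) := by
        rw [List.flatMap_def]; simp only [List.flatMap_def]
        rw [pv_flatten_flatten, List.map_map]; rfl

-- indexed enumeration over a list is the list itself
theorem pv_map_getD_range {α : Type} (l : List α) (d : α) {β : Type} (g : α → β) :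
    (List.range l.length).map (fun i => g (l.getD i d)) = l.map g := by
  apply List.ext_getElem (by simp)
  intro i h1 h2
  simp [List.getD_eq_getElem?_getD, List.getElem?_eq_getElem (by simpa using h1)]

theorem pv_flatMap_getD_range {α : Type} (l : List α) (d : α) {β : Type} (g : α → List β) :
    (List.range l.length).flatMap (fun i => g (l.getD i d)) = l.flatMap g := by
  rw [List.flatMap_def, pv_map_getD_range l d g, ← List.flatMap_def]

-- the decoded key list of B's flat loop is exactly A's nested enumeration
theorem pv_unrank (players states : List String) :
    (List.range (players.length * states.length * states.length * players.length)).map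
      (fun t => (players.getD (t / players.length / states.length / states.length) "",
                 states.getD (t / players.length / states.length % states.length) "",
                 states.getD (t / players.length % states.length) "",
                 players.getD (t % players.length) "")) = pvL players states := by
  have e4 : ∀ (a b c : String),
      (List.range players.length).map (fun r => (a, b, c, players.getD r "")) =
      players.map (fun rs => (a, b, c, rs)) :=
    fun a b c => pv_map_getD_range players "" (fun rs => (a, b, c, rs))
  have e3 : ∀ (a b : String),
      (List.range states.length).flatMap (fun n =>
        players.map (fun rs => (a, b, states.getD n "", rs))) =
      states.flatMap (fun ns => players.map (fun rs => (a, b, ns, rs))) :=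
    fun a b => pv_flatMap_getD_range states "" (fun ns => players.map (fun rs => (a, b, ns, rs)))
  have e2 : ∀ (a : String),
      (List.range states.length).flatMap (fun c =>
        states.flatMap (fun ns => players.map (fun rs => (a, states.getD c "", ns, rs)))) =
      states.flatMap (fun cs => states.flatMap (fun ns => players.map (fun rs => (a, cs, ns, rs)))) :=
    fun a => pv_flatMap_getD_range states ""
      (fun cs => states.flatMap (fun ns => players.map (fun rs => (a, cs, ns, rs))))
  calc (List.range (players.length * states.length * states.length * players.length)).map
        (fun t => (players.getD (t / players.length / states.length / states.length) "",
                   states.getD (t / players.length / states.length % states.length) "",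
                   states.getD (t / players.length % states.length) "",
                   players.getD (t % players.length) ""))
      = (List.range (players.length * states.length * states.length)).flatMap (fun a =>
          (List.range players.length).map (fun r =>
            (players.getD (a / states.length / states.length) "",
             states.getD (a / states.length % states.length) "",
             states.getD (a % states.length) "",
             players.getD r ""))) :=
        pv_range_mul_map (players.length * states.length * states.length) players.length
          (fun a r => (players.getD (a / states.length / states.length) "",
                       states.getD (a / states.length % states.length) "",
                       states.getD (a % states.length) "",
                       players.getD r ""))
    _ = (List.range (players.length * states.length)).flatMap (fun b =>
          (List.range states.length).flatMap (fun n =>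
            (List.range players.length).map (fun r =>
              (players.getD (b / states.length) "",
               states.getD (b % states.length) "",
               states.getD n "",
               players.getD r "")))) :=
        pv_range_mul_flatMap (players.length * states.length) states.length
          (fun b n => (List.range players.length).map (fun r =>
            (players.getD (b / states.length) "",
             states.getD (b % states.length) "",
             states.getD n "",
             players.getD r "")))
    _ = (List.range players.length).flatMap (fun p =>
          (List.range states.length).flatMap (fun c =>
            (List.range states.length).flatMap (fun n =>
              (List.range players.length).map (fun r =>
                (players.getD p "",
                 states.getD c "",
                 states.getD n "",
                 players.getD r ""))))) :=
        pv_range_mul_flatMap players.length states.length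
          (fun p c => (List.range states.length).flatMap (fun n =>
            (List.range players.length).map (fun r =>
              (players.getD p "",
               states.getD c "",
               states.getD n "",
               players.getD r ""))))
    _ = pvL players states := by
        simp only [e4, e3, e2]
        exact pv_flatMap_getD_range players ""
          (fun p => states.flatMap (fun cs => states.flatMap (fun ns => players.map (fun rs => (p, cs, ns, rs)))))

-- A's nested loops flattened to a single fold over pvL
theorem pv_portA_flat (players states : List String) :
    unanimous_consent players states
      = ((pvL players states).foldl (fun d k => d.insert k (pvF k)) PySem.Dict.empty).items.map
        (fun kv => (kv.1.1, kv.1.2.1, kv.1.2.2.1, kv.1.2.2.2, kv.2)) := by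
  have h : ∀ (eff : PySem.Dict (String × String × String × String) Int) (p cs ns r : String),
      (if cs = ns then eff.insert (p, cs, ns, r) (if r = p then (1 : Int) else 0)
       else eff.insert (p, cs, ns, r) 1)
        = eff.insert (p, cs, ns, r) (pvF (p, cs, ns, r)) := by
    intro eff p cs ns r
    simp only [pvF]
    split_ifs <;> rfl
  unfold unanimous_consent pvL
  simp only [List.foldl_flatMap, List.foldl_map, h]

-- B's flat divmod loop is the same fold over pvL
theorem pv_portB_flat (players states : List String) :
    unanimous_consent_alt players states
      = ((pvL players states).foldl (fun d k => d.insert k (pvF k)) PySem.Dict.empty).items.map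
        (fun kv => (kv.1.1, kv.1.2.1, kv.1.2.2.1, kv.1.2.2.2, kv.2)) := by
  have hval : ∀ (a b c d : String),
      (if b ≠ c ∨ d = a then (1 : Int) else 0) = pvF (a, b, c, d) := by
    intro a b c d
    by_cases h1 : b = c <;> by_cases h2 : d = a <;> simp [pvF, h1, h2]
  have hN : ((players.length : Int) * states.length * states.length * players.length - 0).toNat
      = players.length * states.length * states.length * players.length := by
    have h : ((players.length : Int) * states.length * states.length * players.length - 0)
        = ((players.length * states.length * states.length * players.length : Nat) : Int) := by
      push_cast; ring
    rw [h, Int.toNat_natCast]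
  have hd : (PySem.List.pyRange 0 ((players.length : Int) * states.length * states.length * players.length) 1).foldl
      (fun (effectivity : PySem.Dict (String × String × String × String) Int) t =>
        effectivity.insert
          (PySem.List.pyGetD players (PySem.Int.floordiv (PySem.Int.floordiv (PySem.Int.floordiv t players.length) states.length) states.length) "",
           PySem.List.pyGetD states (PySem.Int.mod (PySem.Int.floordiv (PySem.Int.floordiv t players.length) states.length) states.length) "",
           PySem.List.pyGetD states (PySem.Int.mod (PySem.Int.floordiv t players.length) states.length) "",
           PySem.List.pyGetD players (PySem.Int.mod t players.length) "")
          (if PySem.List.pyGetD states (PySem.Int.mod (PySem.Int.floordiv (PySem.Int.floordiv t players.length) states.length) states.length) ""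
              ≠ PySem.List.pyGetD states (PySem.Int.mod (PySem.Int.floordiv t players.length) states.length) ""
            ∨ PySem.List.pyGetD players (PySem.Int.mod t players.length) ""
              = PySem.List.pyGetD players (PySem.Int.floordiv (PySem.Int.floordiv (PySem.Int.floordiv t players.length) states.length) states.length) ""
           then (1 : Int) else 0))
      PySem.Dict.empty
      = (pvL players states).foldl (fun d k => d.insert k (pvF k)) PySem.Dict.empty := by
    rw [PySem.List.pyRange_one, hN, List.foldl_map]
    simp only [zero_add, PySem.Int.mod_natCast, PySem.Int.floordiv_natCast,
      PySem.List.pyGetD_natCast, hval]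
    rw [← pv_unrank players states, List.foldl_map]
  exact congrArg (fun d => d.items.map
    (fun kv : (String × String × String × String) × Int =>
      (kv.1.1, kv.1.2.1, kv.1.2.2.1, kv.1.2.2.2, kv.2))) hd

-- ===== VERDICT (by name: the statement is the Claim_ definition above) =====
theorem unanimous_consent_spec : Claim_equal_unanimous_consent := by
  intro players states _
  unfold Spec_unanimous_consent
  rw [pv_portA_flat, pv_portB_flat]
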